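-- pv_equiv track=rewrite | github.com/RosettaCommons/RFDesign | inpainting/model/mask_generator.py | get_ss
-- ===== SOURCE A (Python) =====
-- def get_ss(ss_string):
--     """
--     Converts secondary structure string into a list of indices of where secondary structure changes (plus start and end coordinates of the sequence)
--     """
--     output = [0]
--     for i in range(1,len(ss_string)):
--         if ss_string[i] != ss_string[i-1]:
--             output.append(i)
--     if output[-1] != len(ss_string)-1:
--         output.append(len(ss_string)-1)
--     return output
-- ===== SOURCE B (Python) =====
-- def get_ss(ss_string):
--     """
--     Converts secondary structure string into a list of indices of where secondary structure changes (plus start and end coordinates of the sequence)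
--     """
--     n = len(ss_string)
--     output = [0]
--     pos = 0
--     while pos < n:
--         c = ss_string[pos]
--         j = pos
--         while j < n and ss_string[j] == c:
--             j += 1
--         if j < n:
--             output.append(j)
--         pos = j
--     if output[-1] != n - 1:
--         output.append(n - 1)
--     return output
-- ===== Notes on version B (the rewrite author's own statement) =====
-- stated objective: alternative
-- what changed: B scans maximal runs of equal characters and records each run boundary as the start of the next run, instead of A's per-index comparison of each character with its predecessor.
import Mathlib
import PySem

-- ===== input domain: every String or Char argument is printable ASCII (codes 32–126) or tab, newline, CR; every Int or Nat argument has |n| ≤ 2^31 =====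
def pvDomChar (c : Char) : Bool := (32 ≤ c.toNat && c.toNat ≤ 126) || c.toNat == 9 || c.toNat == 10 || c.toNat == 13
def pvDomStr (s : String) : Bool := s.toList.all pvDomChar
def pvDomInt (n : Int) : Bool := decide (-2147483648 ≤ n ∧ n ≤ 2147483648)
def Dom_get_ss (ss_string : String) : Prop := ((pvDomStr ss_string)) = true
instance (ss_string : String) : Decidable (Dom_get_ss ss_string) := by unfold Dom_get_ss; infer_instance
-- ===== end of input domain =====

-- B is an alternative decomposition (run-boundary scan instead of per-index predecessor comparison); same cost.

-- ===== PORT A =====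
-- A: output = [0]; for i in range(1, len): append i if s[i] != s[i-1]; final guard appends len-1.
def get_ss (ss_string : String) : List Int :=
  let cs := ss_string.toList
  let n : Int := (cs.length : Int)
  let output : List Int :=
    (PySem.List.pyRange 1 n 1).foldl
      (fun out i =>
        if PySem.List.pyGet? cs i ≠ PySem.List.pyGet? cs (i - 1) then out ++ [i] else out)
      [0]
  if PySem.List.pyGet? output (-1) ≠ some (n - 1) then output ++ [n - 1] else output

-- ===== PORT B =====
-- inner while loop of B: consume one maximal run, emit the start index of the next run (if any).
def bRuns (cs : List Char) (pos : Int) : List Int :=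
  match cs with
  | [] => []
  | c :: rest =>
    let k := (rest.takeWhile (· == c)).length
    let rest' := rest.drop k
    if rest'.isEmpty then []
    else (pos + 1 + (k : Int)) :: bRuns rest' (pos + 1 + (k : Int))
termination_by cs.length
decreasing_by
  simp only [List.length_cons, List.length_drop]
  omega

def get_ss_alt (ss_string : String) : List Int :=
  let cs := ss_string.toList
  let n : Int := (cs.length : Int)
  let output : List Int := 0 :: bRuns cs 0
  if PySem.List.pyGet? output (-1) ≠ some (n - 1) then output ++ [n - 1] else output

-- ===== PRECONDITION & SPEC =====
def Spec_get_ss (ss_string : String) (out : List Int) : Prop := out = get_ss_alt ss_string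
instance (ss_string : String) (out : List Int) : Decidable (Spec_get_ss ss_string out) := by unfold Spec_get_ss; infer_instance

-- ===== CLAIM (what is proved, stated in full; the proofs are below) =====
def Claim_equal_get_ss : Prop := ∀ (ss_string : String), Dom_get_ss ss_string → Spec_get_ss ss_string (get_ss ss_string)

-- ===== LEMMAS AND PROOFS =====

-- reference list of change indices: chg cs pos lists pos+1+j for each adjacent unequal pair at offset j
def chg : List Char → Int → List Int
  | [], _ => []
  | [_], _ => []
  | a :: b :: t, pos => (if b == a then [] else [pos + 1]) ++ chg (b :: t) (pos + 1)

lemma bRuns_skip (c : Char) (t : List Char) (pos : Int) :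
    bRuns (c :: c :: t) pos = bRuns (c :: t) (pos + 1) := by
  rw [bRuns, bRuns]
  simp only [List.takeWhile_cons, beq_self_eq_true, if_true, List.length_cons, List.drop_succ_cons]
  have : (pos + 1 + ((t.takeWhile (· == c)).length + 1 : ℕ)) = pos + 1 + 1 + ((t.takeWhile (· == c)).length : ℤ) := by
    push_cast; ring
  rw [this]

lemma bRuns_eq_chg (cs : List Char) : ∀ pos : Int, bRuns cs pos = chg cs pos := by
  induction cs with
  | nil => intro pos; simp [bRuns, chg]
  | cons c rest ih =>
    intro pos
    match rest with
    | [] => simp [bRuns, chg]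
    | b :: t =>
      by_cases hbc : b = c
      · subst hbc
        rw [bRuns_skip, ih]
        simp [chg]
      · have hb : (b == c) = false := by simp [hbc]
        rw [bRuns, chg]
        simp [hb, ih (pos + 1)]

lemma foldl_eq_chg (cs : List Char) (m : ℕ) :
    ∀ (k : ℕ) (acc : List Int), cs.length - k - 1 = m → k < cs.length →
      (PySem.List.pyRange ((k : Int) + 1) (cs.length : Int) 1).foldl
        (fun out i =>
          if PySem.List.pyGet? cs i ≠ PySem.List.pyGet? cs (i - 1) then out ++ [i] else out)
        acc
      = acc ++ chg (cs.drop k) (k : Int) := by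
  induction m with
  | zero =>
    intro k acc hm hk
    rw [PySem.List.pyRange_one_eq_nil (by omega)]
    rw [List.drop_eq_getElem_cons hk]
    have hnil : cs.drop (k + 1) = [] := by
      apply List.drop_eq_nil_of_le; omega
    simp [hnil, chg]
  | succ m ih =>
    intro k acc hm hk
    have hk1 : k + 1 < cs.length := by omega
    rw [PySem.List.pyRange_one_cons (by omega)]
    simp only [List.foldl_cons]
    have hget1 : PySem.List.pyGet? cs ((k : Int) + 1) = some cs[k + 1] := by
      rw [show ((k : Int) + 1) = ((k + 1 : ℕ) : Int) by push_cast; ring,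
        PySem.List.pyGet?_natCast]
      simp [hk1]
    have hget0 : PySem.List.pyGet? cs ((k : Int) + 1 - 1) = some cs[k] := by
      rw [show ((k : Int) + 1 - 1) = ((k : ℕ) : Int) by ring, PySem.List.pyGet?_natCast]
      simp [hk]
    rw [hget1, hget0]
    rw [show ((k : Int) + 1 + 1) = ((k + 1 : ℕ) : Int) + 1 by push_cast; ring]
    rw [ih (k + 1) _ (by omega) hk1]
    rw [List.drop_eq_getElem_cons hk, List.drop_eq_getElem_cons hk1, chg]
    by_cases h : cs[k + 1] = cs[k]
    · simp [h]
    · have hne : some cs[k + 1] ≠ some cs[k] := by simpa using h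
      simp [h, hne]

lemma core_eq (cs : List Char) :
    (PySem.List.pyRange 1 (cs.length : Int) 1).foldl
      (fun out i =>
        if PySem.List.pyGet? cs i ≠ PySem.List.pyGet? cs (i - 1) then out ++ [i] else out)
      [0]
    = 0 :: bRuns cs 0 := by
  rw [bRuns_eq_chg]
  match cs with
  | [] => simp [chg, PySem.List.pyRange_one_eq_nil]
  | c :: t =>
    have := foldl_eq_chg (c :: t) ((c :: t).length - 1) 0 [0] (by omega) (by simp)
    simpa using this

-- ===== VERDICT (by name: the statement is the Claim_ definition above) =====
theorem get_ss_spec : Claim_equal_get_ss := by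
  intro s _
  show get_ss s = get_ss_alt s
  simp only [get_ss, get_ss_alt]
  rw [core_eq]
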